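-- pv_equiv track=rewrite | github.com/commit-live-students/fsdse-python-assignment-26 | build.py | solution
-- ===== SOURCE A (Python) =====
-- def solution(d1, key):
--     '''Enter Code Here'''
--     lst = []
--     new_dic = {}
--     for i in d1.items():
--         if i[0] != key:
--             lst.append(i)
--     new_dic.update(lst)
--     return new_dic
-- ===== SOURCE B (Python) =====
-- def solution(d1, key):
--     new_dic = dict(d1)
--     new_dic.pop(key, None)
--     return new_dic
-- ===== Notes on version B (the rewrite author's own statement) =====
-- stated objective: simpler
-- what changed: Replaces A's conditional-include loop (filtered items list + dict.update) with an unconditional whole-dict copy followed by a single pop(key, None).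
import Mathlib
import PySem

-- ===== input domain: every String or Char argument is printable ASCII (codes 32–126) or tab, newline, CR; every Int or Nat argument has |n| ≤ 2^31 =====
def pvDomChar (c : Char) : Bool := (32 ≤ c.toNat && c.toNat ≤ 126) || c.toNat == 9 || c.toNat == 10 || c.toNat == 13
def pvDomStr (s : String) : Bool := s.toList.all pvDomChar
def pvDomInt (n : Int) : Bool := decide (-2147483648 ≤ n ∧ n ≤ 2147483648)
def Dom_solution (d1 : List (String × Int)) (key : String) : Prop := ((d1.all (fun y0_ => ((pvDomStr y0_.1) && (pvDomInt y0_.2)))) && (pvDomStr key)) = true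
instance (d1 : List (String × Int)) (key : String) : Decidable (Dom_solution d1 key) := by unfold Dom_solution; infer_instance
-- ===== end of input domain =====

-- B replaces A's conditional-include loop (filtered items + dict.update) with a whole-dict copy followed by pop(key, None); objective: simpler.


-- ===== PORT A =====
def solution (d1 : List (String × Int)) (key : String) : List (String × Int) :=
  let lst : List (String × Int) :=
    (PySem.Dict.ofList d1).items.foldl
      (fun acc i => if i.1 ≠ key then acc ++ [i] else acc) []
  let new_dic := PySem.Dict.update (PySem.Dict.empty : PySem.Dict String Int) lst
  new_dic.items

-- ===== PORT B =====
def solution_alt (d1 : List (String × Int)) (key : String) : List (String × Int) :=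
  let new_dic := PySem.Dict.ofList d1
  ((new_dic.erase key) : PySem.Dict String Int).items

-- ===== PRECONDITION & SPEC =====
def Spec_solution (d1 : List (String × Int)) (key : String) (out : List (String × Int)) : Prop := out = solution_alt d1 key
instance (d1 : List (String × Int)) (key : String) (out : List (String × Int)) : Decidable (Spec_solution d1 key out) := by unfold Spec_solution; infer_instance

-- ===== CLAIM (what is proved, stated in full; the proofs are below) =====
def Claim_equal_solution : Prop := ∀ (d1 : List (String × Int)) (key : String), Dom_solution d1 key → Spec_solution d1 key (solution d1 key)

-- ===== LEMMAS AND PROOFS =====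

-- ===== VERDICT (by name: the statement is the Claim_ definition above) =====
theorem solution_spec : Claim_equal_solution := by
  intro d1 key _
  unfold Spec_solution solution solution_alt
  simp only [PySem.List.foldl_append_ite_eq_filter, List.nil_append]
  rw [PySem.Dict.update]
  rw [PySem.Dict.items_foldl_insert_fresh (k := Prod.fst) (v := Prod.snd)]
  · simp only [PySem.Dict.erase, PySem.Dict.empty, List.nil_append]
    have : (fun a : String × Int => (a.1, a.2)) = id := by funext a; rfl
    rw [this, List.map_id]
    exact List.filter_congr (fun x _ => by by_cases h : x.1 = key <;> simp [h])
  · intro a _; exact PySem.Dict.contains_empty _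
  · have h := PySem.Dict.nodup_keys_ofList (κ := String) (ν := Int) d1
    simp only [PySem.Dict.keys] at h
    exact (List.Sublist.map Prod.fst List.filter_sublist).nodup h
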